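-- pv_equiv track=rewrite | github.com/jmkim0514/tool_core_gen | v1.0/lib/modport_r0p04.py | get_task_line
-- ===== SOURCE A (Python) =====
-- def get_task_line (lines) :
--     task_line_list = []
--     for num, line in enumerate(lines) :
--         if line.find('task') > -1 and line.find('endtask') == -1 :
--             start = num
--         if line.find('endtask') > -1 :
--             end = num
--             task_line_list.append((start, end))
--
--     return task_line_list
-- ===== SOURCE B (Python) =====
-- def get_task_line(lines):
--     starts = [i for i, l in enumerate(lines) if 'task' in l and 'endtask' not in l]
--     ends = [i for i, l in enumerate(lines) if 'endtask' in l]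
--     result = []
--     for e in ends:
--         preceding = [s for s in starts if s < e]
--         result.append((preceding[-1], e))
--     return result
-- ===== Notes on version B (the rewrite author's own statement) =====
-- stated objective: alternative
-- what changed: A is a single stateful scan carrying the latest start in a mutable variable; B instead builds the index lists of starts and ends in two comprehensions and then pairs each end with the last start index preceding it. Pre_ excludes inputs where some 'endtask' line has no earlier start line: there A raises UnboundLocalError and B raises IndexError.
import Mathlib
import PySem

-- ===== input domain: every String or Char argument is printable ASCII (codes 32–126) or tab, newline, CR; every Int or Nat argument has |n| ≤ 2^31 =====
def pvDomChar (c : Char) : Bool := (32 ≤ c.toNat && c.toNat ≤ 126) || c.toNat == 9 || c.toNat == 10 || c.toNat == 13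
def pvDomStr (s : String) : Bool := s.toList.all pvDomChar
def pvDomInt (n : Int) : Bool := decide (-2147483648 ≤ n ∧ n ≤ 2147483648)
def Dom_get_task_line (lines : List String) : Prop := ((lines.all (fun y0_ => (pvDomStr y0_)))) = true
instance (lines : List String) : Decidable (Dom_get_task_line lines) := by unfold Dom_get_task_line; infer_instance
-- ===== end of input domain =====

-- B replaces A's single stateful scan (mutable latest-start variable) by two index-list comprehensions
-- (starts, ends) and a pairing pass; same return value wherever A returns (objective: alternative).

-- ===== PORT A =====
-- loop body of A's for-loop (state = (task_line_list, the 'start' variable; none = still unbound))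
def pvBodyA (st : List (Int × Int) × Option Int) (nl : Int × String) :
    List (Int × Int) × Option Int :=
  let st1 := if PySem.Str.find nl.2 "task" > -1 ∧ PySem.Str.find nl.2 "endtask" = -1
             then (st.1, some nl.1) else st
  if PySem.Str.find nl.2 "endtask" > -1 then
    match st1.2 with
    | some s => (st1.1 ++ [(s, nl.1)], st1.2)
    | none => st1   -- Python raises UnboundLocalError here; such inputs are excluded by Pre_
  else st1

def get_task_line (lines : List String) : List (Int × Int) :=
  ((PySem.List.enumerate lines 0).foldl pvBodyA ([], none)).1

-- ===== PORT B =====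
def pvStart (l : String) : Bool := PySem.Str.isIn "task" l && !PySem.Str.isIn "endtask" l
def pvEnd (l : String) : Bool := PySem.Str.isIn "endtask" l

-- loop body of B's pairing pass (preceding = starts.filter (· < e))
def pvBodyB (starts : List Int) (result : List (Int × Int)) (e : Int) : List (Int × Int) :=
  match PySem.List.pyGet? (starts.filter (fun s => decide (s < e))) (-1) with
  | some s => result ++ [(s, e)]
  | none => result   -- Python: preceding[-1] raises IndexError here; excluded by Pre_

def get_task_line_alt (lines : List String) : List (Int × Int) :=
  let starts := ((PySem.List.enumerate lines 0).filter (fun p => pvStart p.2)).map (fun p => p.1)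
  let ends := ((PySem.List.enumerate lines 0).filter (fun p => pvEnd p.2)).map (fun p => p.1)
  ends.foldl (pvBodyB starts) []

-- ===== PRECONDITION & SPEC =====
-- Pre_ excludes inputs where some line containing 'endtask' has no earlier line containing 'task'
-- but not 'endtask': there Python A raises UnboundLocalError (and Python B raises IndexError).
def Pre_get_task_line (lines : List String) : Prop :=
  ∀ i ∈ List.range lines.length, PySem.Str.isIn "endtask" (lines.getD i "") = true →
    ∃ j ∈ List.range i, (PySem.Str.isIn "task" (lines.getD j "") && !PySem.Str.isIn "endtask" (lines.getD j "")) = true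
instance (lines : List String) : Decidable (Pre_get_task_line lines) := by
  unfold Pre_get_task_line; infer_instance

def pvWitness_get_task_line : List String := ["task foo", "x", "endtask"]

def Spec_get_task_line (lines : List String) (out : List (Int × Int)) : Prop := out = get_task_line_alt lines
instance (lines : List String) (out : List (Int × Int)) : Decidable (Spec_get_task_line lines out) := by unfold Spec_get_task_line; infer_instance

-- ===== CLAIM (what is proved, stated in full; the proofs are below) =====
def Claim_equal_get_task_line : Prop := ∀ (lines : List String), Dom_get_task_line lines → Pre_get_task_line lines → Spec_get_task_line lines (get_task_line lines)

-- ===== LEMMAS AND PROOFS =====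

-- the pairs produced by one left-to-right scan carrying the latest start (proof-side reference)
def pvPairs : List (Int × String) → Option Int → List (Int × Int)
  | [], _ => []
  | (n, l) :: ps, st =>
    let st' := if pvStart l then some n else st
    if pvEnd l then
      (match st' with | some s => [(s, n)] | none => []) ++ pvPairs ps st'
    else pvPairs ps st'

def pvOpt : Option Int → List Int
  | none => []
  | some s => [s]

def pvStarts (ps : List (Int × String)) : List Int :=
  (ps.filter (fun p => pvStart p.2)).map (fun p => p.1)
def pvEnds (ps : List (Int × String)) : List Int :=
  (ps.filter (fun p => pvEnd p.2)).map (fun p => p.1)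

lemma pvStartA_iff (l : String) :
    (PySem.Str.find l "task" > -1 ∧ PySem.Str.find l "endtask" = -1) ↔ pvStart l = true := by
  have h1 := PySem.Str.find_ne_neg_one_iff l "task"
  have h2 := PySem.Str.find_ne_neg_one_iff l "endtask"
  have h3 : -1 ≤ PySem.Str.find l "task" := by
    simpa using PySem.Chars.neg_one_le_find l.toList "task".toList
  have h4 := PySem.Str.isIn_iff_infix "task" l
  have h5 := PySem.Str.isIn_iff_infix "endtask" l
  unfold pvStart
  rw [Bool.and_eq_true, Bool.not_eq_true']
  constructor
  · rintro ⟨ha, hb⟩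
    refine ⟨h4.mpr (h1.mp (by omega)), ?_⟩
    cases hc : PySem.Str.isIn "endtask" l
    · rfl
    · exact absurd hb (h2.mpr (h5.mp hc))
  · rintro ⟨ha, hb⟩
    have hti := h1.mpr (h4.mp ha)
    have hfe : PySem.Str.find l "endtask" = -1 := by
      by_contra hc
      rw [h5.mpr (h2.mp hc)] at hb; cases hb
    exact ⟨by omega, hfe⟩

lemma pvEndA_iff (l : String) :
    (PySem.Str.find l "endtask" > -1) ↔ pvEnd l = true := by
  have h2 := PySem.Str.find_ne_neg_one_iff l "endtask"
  have h3 : -1 ≤ PySem.Str.find l "endtask" := by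
    simpa using PySem.Chars.neg_one_le_find l.toList "endtask".toList
  have h5 := PySem.Str.isIn_iff_infix "endtask" l
  unfold pvEnd
  constructor
  · intro h; exact h5.mpr (h2.mp (by omega))
  · intro h
    have := h2.mpr (h5.mp h); omega

lemma pvStart_not_end (l : String) (h : pvStart l = true) : pvEnd l = false := by
  unfold pvStart at h
  rw [Bool.and_eq_true, Bool.not_eq_true'] at h
  unfold pvEnd
  exact h.2

lemma foldA_eq (ps : List (Int × String)) : ∀ (acc : List (Int × Int)) (st : Option Int),
    (ps.foldl pvBodyA (acc, st)).1 = acc ++ pvPairs ps st := by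
  induction ps with
  | nil => intro acc st; simp [pvPairs]
  | cons hd ps ih =>
    intro acc st
    obtain ⟨n, l⟩ := hd
    rw [List.foldl_cons]
    by_cases hS : pvStart l = true
    · have hE : pvEnd l = false := pvStart_not_end l hS
      have hA : PySem.Str.find l "task" > -1 ∧ PySem.Str.find l "endtask" = -1 :=
        (pvStartA_iff l).mpr hS
      have hEa : ¬ (PySem.Str.find l "endtask" > -1) := by
        intro hc; rw [(pvEndA_iff l).mp hc] at hE; cases hE
      have hbody : pvBodyA (acc, st) (n, l) = (acc, some n) := by
        unfold pvBodyA; rw [if_pos hA, if_neg hEa]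
      rw [hbody, ih]
      simp [pvPairs, hS, hE]
    · have hAn : ¬ (PySem.Str.find l "task" > -1 ∧ PySem.Str.find l "endtask" = -1) := by
        intro hc; exact hS ((pvStartA_iff l).mp hc)
      by_cases hE : pvEnd l = true
      · have hEa : PySem.Str.find l "endtask" > -1 := (pvEndA_iff l).mpr hE
        cases st with
        | none =>
          have hbody : pvBodyA (acc, none) (n, l) = (acc, none) := by
            unfold pvBodyA; rw [if_neg hAn, if_pos hEa]
          rw [hbody, ih]
          simp [pvPairs, hS, hE]
        | some s =>
          have hbody : pvBodyA (acc, some s) (n, l) = (acc ++ [(s, n)], some s) := by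
            unfold pvBodyA; rw [if_neg hAn, if_pos hEa]
          rw [hbody, ih]
          simp [pvPairs, hS, hE]
      · have hEa : ¬ (PySem.Str.find l "endtask" > -1) := by
          intro hc; exact hE ((pvEndA_iff l).mp hc)
        have hbody : pvBodyA (acc, st) (n, l) = (acc, st) := by
          unfold pvBodyA; rw [if_neg hAn, if_neg hEa]
        rw [hbody, ih]
        simp [pvPairs, hS, hE]

lemma pvBodyB_acc (ss : List Int) (acc : List (Int × Int)) (e : Int) :
    pvBodyB ss acc e = acc ++ pvBodyB ss [] e := by
  unfold pvBodyB
  split <;> simp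

lemma foldB_acc (ss : List Int) (es : List Int) : ∀ (acc : List (Int × Int)),
    es.foldl (pvBodyB ss) acc = acc ++ es.foldl (pvBodyB ss) [] := by
  induction es with
  | nil => intro acc; simp
  | cons e es ih =>
    intro acc
    rw [List.foldl_cons, List.foldl_cons, ih, ih (pvBodyB ss [] e),
      pvBodyB_acc ss acc e, List.append_assoc]

lemma getLast?_append_of_ne_nil {α : Type} (a b : List α) (h : b ≠ []) :
    (a ++ b).getLast? = b.getLast? := by
  have hs : b.getLast?.isSome := List.getLast?_isSome.mpr h
  rw [List.getLast?_append]
  cases hb : b.getLast? with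
  | none => rw [hb] at hs; cases hs
  | some x => rfl

lemma mem_pvStarts {ps : List (Int × String)} {e : Int} (h : e ∈ pvStarts ps) :
    ∃ p ∈ ps, p.1 = e := by
  unfold pvStarts at h
  rcases List.mem_map.mp h with ⟨p, hp, rfl⟩
  exact ⟨p, (List.mem_filter.mp hp).1, rfl⟩

lemma mem_pvEnds {ps : List (Int × String)} {e : Int} (h : e ∈ pvEnds ps) :
    ∃ p ∈ ps, p.1 = e := by
  unfold pvEnds at h
  rcases List.mem_map.mp h with ⟨p, hp, rfl⟩
  exact ⟨p, (List.mem_filter.mp hp).1, rfl⟩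

lemma pairs_eq (ps : List (Int × String)) : ∀ (st : Option Int),
    List.Pairwise (fun p q => p.1 < q.1) ps →
    (∀ s, st = some s → ∀ p ∈ ps, s < p.1) →
    (pvEnds ps).foldl (pvBodyB (pvOpt st ++ pvStarts ps)) [] = pvPairs ps st := by
  induction ps with
  | nil => intro st _ _; simp [pvEnds, pvPairs]
  | cons hd ps ih =>
    intro st hpw hstb
    obtain ⟨n, l⟩ := hd
    have hlt : ∀ p ∈ ps, n < p.1 := by
      intro p hp; exact (List.pairwise_cons.mp hpw).1 p hp
    have hpw' := (List.pairwise_cons.mp hpw).2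
    by_cases hS : pvStart l = true
    · have hE : pvEnd l = false := pvStart_not_end l hS
      have hstarts : pvStarts ((n, l) :: ps) = n :: pvStarts ps := by
        simp [pvStarts, hS]
      have hends : pvEnds ((n, l) :: ps) = pvEnds ps := by
        simp [pvEnds, hE]
      rw [hstarts, hends]
      have hih := ih (some n) hpw' (by intro s hs p hp; injection hs with h; subst h; exact hlt p hp)
      have hcongr : ∀ (acc : List (Int × Int)), ∀ e ∈ pvEnds ps,
          pvBodyB (pvOpt st ++ n :: pvStarts ps) acc e = pvBodyB (pvOpt (some n) ++ pvStarts ps) acc e := by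
        intro acc e he
        rcases mem_pvEnds he with ⟨p, hp, rfl⟩
        have hne : n < p.1 := hlt p hp
        have hgl : ((pvOpt st ++ n :: pvStarts ps).filter (fun s => decide (s < p.1))).getLast?
            = ((pvOpt (some n) ++ pvStarts ps).filter (fun s => decide (s < p.1))).getLast? := by
          rw [List.filter_append]
          rw [getLast?_append_of_ne_nil _ _ (by simp [hne])]
          rfl
        unfold pvBodyB
        rw [PySem.List.pyGet?_neg_one, PySem.List.pyGet?_neg_one, hgl]
      rw [PySem.List.foldl_congr_mem _ _ _ _ hcongr, hih]
      simp [pvPairs, hS, hE]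
    · by_cases hE : pvEnd l = true
      · have hstarts : pvStarts ((n, l) :: ps) = pvStarts ps := by
          simp [pvStarts, hS]
        have hends : pvEnds ((n, l) :: ps) = n :: pvEnds ps := by
          simp [pvEnds, hE]
        have hfil : (pvStarts ps).filter (fun s => decide (s < n)) = [] := by
          rw [List.filter_eq_nil_iff]
          intro e he
          rcases mem_pvStarts he with ⟨p, hp, rfl⟩
          have := hlt p hp
          simp; omega
        rw [hstarts, hends, List.foldl_cons, foldB_acc]
        cases st with
        | none =>
          have hih := ih none hpw' (by intro s hs; cases hs)
          have hfirst : pvBodyB (pvOpt none ++ pvStarts ps) [] n = [] := by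
            simp [pvBodyB, pvOpt, hfil, PySem.List.pyGet?_neg_one]
          rw [hih, hfirst]
          simp [pvPairs, hS, hE]
        | some s =>
          have hsn : s < n := hstb s rfl (n, l) (by simp)
          have hih := ih (some s) hpw'
            (by intro s' hs' p hp; cases hs'
                exact hstb s rfl p (List.mem_cons_of_mem _ hp))
          have hfirst : pvBodyB (pvOpt (some s) ++ pvStarts ps) [] n = [(s, n)] := by
            simp [pvBodyB, pvOpt, hfil, hsn, PySem.List.pyGet?_neg_one]
          rw [hih, hfirst]
          simp [pvPairs, hS, hE]
      · have hEf : pvEnd l = false := by cases h : pvEnd l; rfl; exact absurd h hE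
        have hstarts : pvStarts ((n, l) :: ps) = pvStarts ps := by
          simp [pvStarts, hS]
        have hends : pvEnds ((n, l) :: ps) = pvEnds ps := by
          simp [pvEnds, hEf]
        rw [hstarts, hends]
        have hih := ih st hpw' (by
          intro s hs p hp; subst hs
          exact hstb s rfl p (List.mem_cons_of_mem _ hp))
        rw [hih]
        simp [pvPairs, hS, hEf]

lemma alt_eq (lines : List String) :
    get_task_line_alt lines
      = (pvEnds (PySem.List.enumerate lines 0)).foldl
          (pvBodyB (pvStarts (PySem.List.enumerate lines 0))) [] := rfl

-- ===== VERDICT (by name: the statement is the Claim_ definition above) =====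
theorem get_task_line_spec : Claim_equal_get_task_line := by
  intro lines _ _
  unfold Spec_get_task_line
  rw [alt_eq]
  have hA : get_task_line lines = pvPairs (PySem.List.enumerate lines 0) none := by
    unfold get_task_line
    rw [foldA_eq]
    rfl
  have hB := pairs_eq (PySem.List.enumerate lines 0) none
    (PySem.List.pairwise_lt_enumerate lines 0) (by intro s h; cases h)
  rw [hA, ← hB]
  rfl
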